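-- pv_equiv track=rewrite | github.com/DanLip02/Ratings-analysis-project | backend/main.py | count_moves
-- ===== SOURCE A (Python) =====
-- from collections import Counter, defaultdict
--
-- def count_moves(dict_: dict) -> dict:
--     temp_ = {}
--     counter_rat = []
--     result = {}
--     for key_, value_ in dict_.items():
--         for val in value_:
--             if len(val) == 3:
--                 if key_ not in temp_:
--                     temp_[key_] = []
--                 temp_[key_].append(val[1])
--
--     for key_, value_ in temp_.items():
--         if key_ not in result:
--             result[key_] = {}
--         value_1 = temp_[key_]
--         temp_dict = {}
--         for i in range(len(set(value_1))):
--             temp_dict[list(Counter(value_1).keys())[i]] = list(Counter(value_1).values())[i]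
--         result[key_] = temp_dict
--     return result
-- ===== SOURCE B (Python) =====
-- def count_moves(dict_: dict) -> dict:
--     result = {}
--     for key, value in dict_.items():
--         for val in value:
--             if len(val) == 3:
--                 inner = result.get(key, {})
--                 inner[val[1]] = inner.get(val[1], 0) + 1
--                 result[key] = inner
--     return result
-- ===== Notes on version B (the rewrite author's own statement) =====
-- stated objective: simpler
-- what changed: B builds the nested count dict directly in one fused pass over the input, incrementing the per-key inner counter as each length-3 entry is seen, eliminating A's temp_ list-collection phase, the second loop over temp_, and the per-key rebuilding of Counter twice per distinct element inside an index loop.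
import Mathlib
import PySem

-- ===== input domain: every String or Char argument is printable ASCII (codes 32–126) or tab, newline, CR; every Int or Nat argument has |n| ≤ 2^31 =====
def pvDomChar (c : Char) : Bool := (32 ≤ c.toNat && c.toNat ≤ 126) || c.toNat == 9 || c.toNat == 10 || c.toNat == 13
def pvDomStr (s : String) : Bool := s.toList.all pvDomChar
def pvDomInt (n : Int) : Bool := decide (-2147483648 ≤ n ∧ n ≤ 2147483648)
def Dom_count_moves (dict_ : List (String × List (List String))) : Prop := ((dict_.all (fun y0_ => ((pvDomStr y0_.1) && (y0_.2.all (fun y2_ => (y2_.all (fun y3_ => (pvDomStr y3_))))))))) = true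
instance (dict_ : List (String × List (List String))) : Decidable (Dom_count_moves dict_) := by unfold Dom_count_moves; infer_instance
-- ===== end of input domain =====

-- B fuses A's two phases: it counts val[1] occurrences directly into a nested dict in one pass,
-- with no temp_ collection phase, no second loop, and no Counter rebuilds (objective: simpler).

-- ===== PORT A =====
-- val[1] is only read under the guard len(val) == 3, so the index is always in range;
-- the .getD "" default is never used.
def count_moves (dict_ : List (String × List (List String))) : List (String × List (String × Int)) :=
  let temp_ : PySem.Dict String (List String) :=
    dict_.foldl (fun t kv =>
      kv.2.foldl (fun t val =>
        if val.length == 3 then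
          let t := if t.contains kv.1 then t else t.insert kv.1 []
          t.modify kv.1 [] (fun l => l ++ [(PySem.List.pyGet? val 1).getD ""])
        else t) t) PySem.Dict.empty
  let result : PySem.Dict String (PySem.Dict String Int) :=
    temp_.items.foldl (fun r kv =>
      let r := if r.contains kv.1 then r else r.insert kv.1 PySem.Dict.empty
      let value_1 := temp_.getD kv.1 []
      -- list(Counter(value_1).keys())[i] / list(Counter(value_1).values())[i]: i ranges over
      -- range(len(set(value_1))) = range(len(Counter)), so both indexings always succeed;
      -- the no-op fallback branch is unreachable.
      let temp_dict : PySem.Dict String Int :=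
        (PySem.List.pyRange 0 (PySem.Set.len (PySem.Set.ofList value_1)) 1).foldl
          (fun td i =>
            match PySem.List.pyGet? (PySem.Dict.counter value_1 : PySem.Dict String Int).keys i,
                  PySem.List.pyGet? (PySem.Dict.counter value_1 : PySem.Dict String Int).values i with
            | some k, some v => td.insert k v
            | _, _ => td) PySem.Dict.empty
      r.insert kv.1 temp_dict) PySem.Dict.empty
  result.items.map (fun kv => (kv.1, kv.2.items))

-- ===== PORT B =====
def count_moves_alt (dict_ : List (String × List (List String))) : List (String × List (String × Int)) :=
  let result : PySem.Dict String (PySem.Dict String Int) :=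
    dict_.foldl (fun r kv =>
      kv.2.foldl (fun r val =>
        if val.length == 3 then
          let x := (PySem.List.pyGet? val 1).getD ""
          let inner := r.getD kv.1 PySem.Dict.empty
          r.insert kv.1 (inner.insert x (inner.getD x 0 + 1))
        else r) r) PySem.Dict.empty
  result.items.map (fun kv => (kv.1, kv.2.items))

-- ===== PRECONDITION & SPEC =====
def Spec_count_moves (dict_ : List (String × List (List String))) (out : List (String × List (String × Int))) : Prop := out = count_moves_alt dict_
instance (dict_ : List (String × List (List String))) (out : List (String × List (String × Int))) : Decidable (Spec_count_moves dict_ out) := by unfold Spec_count_moves; infer_instance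

-- ===== CLAIM (what is proved, stated in full; the proofs are below) =====
def Claim_equal_count_moves : Prop := ∀ (dict_ : List (String × List (List String))), Dom_count_moves dict_ → Spec_count_moves dict_ (count_moves dict_)

-- ===== LEMMAS AND PROOFS =====

-- the stream of (key, val[1]) pairs both programs process, in order
def pvPairs (dict_ : List (String × List (List String))) : List (String × String) :=
  dict_.flatMap (fun kv => (kv.2.filter (fun v => v.length == 3)).map (fun v => (kv.1, (PySem.List.pyGet? v 1).getD "")))

-- A's phase-1 per-pair step (conditional pre-insert then append via modify)
def pvStepA (t : PySem.Dict String (List String)) (p : String × String) : PySem.Dict String (List String) :=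
  (if t.contains p.1 then t else t.insert p.1 []).modify p.1 [] (fun l => l ++ [p.2])

-- the clean grouping fold (A's phase 1 without the redundant pre-insert)
def pvGroup (ps : List (String × String)) : PySem.Dict String (List String) :=
  ps.foldl (fun t p => t.modify p.1 [] (fun l => l ++ [p.2])) PySem.Dict.empty

-- turn a grouped entry into its counted entry
def pvCf (kv : String × List String) : String × PySem.Dict String Int := (kv.1, PySem.Dict.counter kv.2)

-- B's per-pair step
def pvStepB (r : PySem.Dict String (PySem.Dict String Int)) (p : String × String) : PySem.Dict String (PySem.Dict String Int) :=
  let inner := r.getD p.1 PySem.Dict.empty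
  r.insert p.1 (inner.insert p.2 (inner.getD p.2 0 + 1))

-- A's index loop rebuilding Counter(value_1) from its keys/values lists
def pvRangeFold (value_1 : List String) : PySem.Dict String Int :=
  (PySem.List.pyRange 0 (PySem.Set.len (PySem.Set.ofList value_1)) 1).foldl
    (fun td i =>
      match PySem.List.pyGet? (PySem.Dict.counter value_1 : PySem.Dict String Int).keys i,
            PySem.List.pyGet? (PySem.Dict.counter value_1 : PySem.Dict String Int).values i with
      | some k, some v => td.insert k v
      | _, _ => td) PySem.Dict.empty

-- A's phase 2
def pvPhase2 (temp : PySem.Dict String (List String)) : PySem.Dict String (PySem.Dict String Int) :=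
  temp.items.foldl (fun r kv =>
    (if r.contains kv.1 then r else r.insert kv.1 PySem.Dict.empty).insert kv.1
      (pvRangeFold (temp.getD kv.1 []))) PySem.Dict.empty

theorem pv_inner_foldl {σ : Type} (g : σ → String × String → σ) (k : String) :
    ∀ (vals : List (List String)) (init : σ),
    vals.foldl (fun acc val => if val.length == 3 then g acc (k, (PySem.List.pyGet? val 1).getD "") else acc) init
      = ((vals.filter (fun v => v.length == 3)).map (fun v => (k, (PySem.List.pyGet? v 1).getD ""))).foldl g init := by
  intro vals
  induction vals with
  | nil => intro init; rfl
  | cons v vs ih =>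
      intro init
      rw [List.foldl_cons, List.filter_cons]
      by_cases h : (v.length == 3) = true
      · rw [if_pos h, if_pos h, List.map_cons, List.foldl_cons, ih]
      · rw [if_neg h, if_neg h, ih]

theorem pv_nested_foldl {σ : Type} (g : σ → String × String → σ) :
    ∀ (l : List (String × List (List String))) (init : σ),
    l.foldl (fun acc kv =>
        kv.2.foldl (fun acc val => if val.length == 3 then g acc (kv.1, (PySem.List.pyGet? val 1).getD "") else acc) acc) init
      = (pvPairs l).foldl g init := by
  intro l
  induction l with
  | nil => intro init; rfl
  | cons kv rest ih =>
      intro init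
      simp only [pvPairs, List.flatMap_cons, List.foldl_append, List.foldl_cons]
      rw [pv_inner_foldl g kv.1 kv.2 init, ih]
      rfl

theorem pv_modify_skip_insert (d : PySem.Dict String (List String)) (k : String) (x : String) :
    pvStepA d (k, x) = d.modify k [] (fun l => l ++ [x]) := by
  unfold pvStepA
  by_cases h : d.contains k = true
  · simp [h]
  · simp only [Bool.not_eq_true] at h
    simp only [h, Bool.false_eq_true, if_false]
    show (d.insert k []).insert k (((d.insert k []).getD k []) ++ [x])
        = d.insert k ((d.getD k []) ++ [x])
    rw [PySem.Dict.getD_insert_self, PySem.Dict.insert_insert_self,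
        PySem.Dict.getD_of_not_contains d [] h]

theorem pv_groupA (ps : List (String × String)) :
    ps.foldl pvStepA PySem.Dict.empty = pvGroup ps := by
  unfold pvGroup
  exact PySem.List.foldl_congr_mem _ _ _ _ (fun acc p _ => pv_modify_skip_insert acc p.1 p.2)

theorem pv_nodup_group (ps : List (String × String)) : (pvGroup ps).keys.Nodup := by
  unfold pvGroup
  exact PySem.Dict.nodup_keys_foldl_modify_key ps Prod.fst [] (fun _ p l => l ++ [p.2]) PySem.Dict.empty PySem.Dict.nodup_keys_empty

theorem pv_counter_step (l : List String) (x : String) :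
    (PySem.Dict.counter l : PySem.Dict String Int).insert x ((PySem.Dict.counter l : PySem.Dict String Int).getD x 0 + 1)
      = PySem.Dict.counter (l ++ [x]) := by
  rw [PySem.Dict.counter_append_singleton]
  rfl

theorem pv_keys_map_cf (items : List (String × List String)) :
    (items.map pvCf).map Prod.fst = items.map Prod.fst := by
  rw [List.map_map]; rfl

-- one step of B on a counted dict = counting after one step of the grouping
theorem pv_step_commute (t : PySem.Dict String (List String)) (ht : t.keys.Nodup) (p : String × String) :
    pvStepB (PySem.Dict.mk (t.items.map pvCf)) p
      = PySem.Dict.mk ((t.modify p.1 [] (fun l => l ++ [p.2])).items.map pvCf) := by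
  have hkeys : (PySem.Dict.mk (t.items.map pvCf)).keys = t.keys := pv_keys_map_cf t.items
  have hcont : (PySem.Dict.mk (t.items.map pvCf)).contains p.1 = t.contains p.1 := by
    rw [PySem.Dict.contains_eq_decide_mem_keys, PySem.Dict.contains_eq_decide_mem_keys, hkeys]
  have hmod : t.modify p.1 [] (fun l => l ++ [p.2]) = t.insert p.1 ((t.getD p.1 []) ++ [p.2]) := rfl
  by_cases h : t.contains p.1 = true
  · -- key already present: entry l is updated in place on both sides
    have hmem : p.1 ∈ t.keys := by
      have hc := PySem.Dict.contains_eq_decide_mem_keys t p.1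
      rw [h] at hc; exact of_decide_eq_true hc.symm
    obtain ⟨q, hq, hq1⟩ := List.mem_map.mp hmem
    obtain ⟨k0, l⟩ := q
    cases hq1
    have hgetD : t.getD p.1 [] = l := PySem.Dict.getD_of_mem_items t hq ht []
    have hgetDr : (PySem.Dict.mk (t.items.map pvCf)).getD p.1 PySem.Dict.empty = PySem.Dict.counter l := by
      refine PySem.Dict.getD_of_mem_items _ ?_ ?_ _
      · exact List.mem_map.mpr ⟨(p.1, l), hq, rfl⟩
      · rw [hkeys]; exact ht
    apply PySem.Dict.ext
    unfold pvStepB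
    simp only [hgetDr, pv_counter_step]
    rw [PySem.Dict.items_insert_of_contains _ _ (by rw [hcont]; exact h)]
    rw [hmod, hgetD, PySem.Dict.items_insert_of_contains _ _ h]
    simp only [List.map_map]
    refine List.map_congr_left (fun q _ => ?_)
    by_cases hqk : (q.1 == p.1) = true
    · simp [Function.comp, pvCf, hqk]
    · simp [Function.comp, pvCf, hqk]
  · -- fresh key: both sides append a new entry
    simp only [Bool.not_eq_true] at h
    have hgetDr : (PySem.Dict.mk (t.items.map pvCf)).getD p.1 PySem.Dict.empty = PySem.Dict.empty :=
      PySem.Dict.getD_of_not_contains _ _ (by rw [hcont]; exact h)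
    apply PySem.Dict.ext
    unfold pvStepB
    simp only [hgetDr]
    rw [PySem.Dict.items_insert_of_not_contains _ _ (by rw [hcont]; exact h)]
    rw [hmod, PySem.Dict.getD_of_not_contains t [] h,
        PySem.Dict.items_insert_of_not_contains _ _ h]
    simp only [List.map_append]
    rfl

theorem pv_nodup_modify_step (t : PySem.Dict String (List String)) (ht : t.keys.Nodup) (p : String × String) :
    (t.modify p.1 [] (fun l => l ++ [p.2])).keys.Nodup := by
  have h := PySem.Dict.nodup_keys_foldl_modify_key [p] Prod.fst [] (fun _ q l => l ++ [q.2]) t ht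
  simpa using h

-- B's fold over the pair stream = counting of the grouping fold
theorem pv_b_fold (ps : List (String × String)) :
    ∀ (t : PySem.Dict String (List String)), t.keys.Nodup →
    ps.foldl pvStepB (PySem.Dict.mk (t.items.map pvCf))
      = PySem.Dict.mk ((ps.foldl (fun t p => t.modify p.1 [] (fun l => l ++ [p.2])) t).items.map pvCf) := by
  induction ps with
  | nil => intro t _; rfl
  | cons p ps ih =>
      intro t ht
      simp only [List.foldl_cons]
      rw [pv_step_commute t ht p]
      exact ih _ (pv_nodup_modify_step t ht p)

theorem pv_b_fold_empty (ps : List (String × String)) :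
    ps.foldl pvStepB PySem.Dict.empty = PySem.Dict.mk ((pvGroup ps).items.map pvCf) :=
  pv_b_fold ps PySem.Dict.empty PySem.Dict.nodup_keys_empty

-- the index loop over range(n) zips the first n keys with the first n values
theorem pv_range_zip (ks : List String) (vs : List Int) (hnd : ks.Nodup) (hlen : vs.length = ks.length) :
    ∀ n : ℕ, n ≤ ks.length →
    (PySem.List.pyRange 0 (n : Int) 1).foldl
      (fun td i =>
        match PySem.List.pyGet? ks i, PySem.List.pyGet? vs i with
        | some k, some v => td.insert k v
        | _, _ => td) PySem.Dict.empty
      = PySem.Dict.mk ((ks.take n).zip (vs.take n)) := by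
  intro n
  induction n with
  | zero =>
      intro _
      rw [PySem.List.pyRange_one_eq_nil (by norm_num)]
      rfl
  | succ n ih =>
      intro hle
      have hn : n < ks.length := Nat.lt_of_succ_le hle
      have hnv : n < vs.length := by omega
      have hc : ((n + 1 : ℕ) : Int) = (n : Int) + 1 := by push_cast; ring
      rw [hc, PySem.List.pyRange_one_succ_right (by positivity), List.foldl_append,
          ih (Nat.le_of_lt hn)]
      simp only [List.foldl_cons, List.foldl_nil]
      rw [PySem.List.pyGet?_ofNat ks n hn, PySem.List.pyGet?_ofNat vs n hnv]
      have hcont : (PySem.Dict.mk ((ks.take n).zip (vs.take n))).contains ks[n] = false := by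
        rw [PySem.Dict.contains_eq_decide_mem_keys]
        apply decide_eq_false
        intro hmem
        have hkeys : (PySem.Dict.mk ((ks.take n).zip (vs.take n))).keys = ks.take n := by
          show ((ks.take n).zip (vs.take n)).map Prod.fst = ks.take n
          exact List.map_fst_zip (by simp [List.length_take]; omega)
        rw [hkeys] at hmem
        obtain ⟨j, hj, hje⟩ := List.mem_iff_getElem.mp hmem
        have hjlen : j < n := by simp [List.length_take] at hj; omega
        have hjk : j < ks.length := by omega
        rw [List.getElem_take] at hje
        have hjn : j = n := (List.Nodup.getElem_inj_iff hnd).mp hje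
        omega
      apply PySem.Dict.ext
      rw [PySem.Dict.items_insert_of_not_contains _ _ hcont]
      show (ks.take n).zip (vs.take n) ++ [(ks[n], vs[n])] = (ks.take (n+1)).zip (vs.take (n+1))
      rw [List.take_add_one, List.take_add_one, List.getElem?_eq_getElem hn, List.getElem?_eq_getElem hnv]
      rw [List.zip_append (by simp [List.length_take]; omega)]
      rfl

theorem pv_rangeFold_eq_counter (l : List String) :
    pvRangeFold l = PySem.Dict.counter l := by
  have hk : (PySem.Dict.counter l : PySem.Dict String Int).keys = PySem.Set.ofList l :=
    PySem.Dict.keys_counter l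
  have hnd : (PySem.Dict.counter l : PySem.Dict String Int).keys.Nodup := by
    rw [hk]; exact PySem.Set.nodup_ofList l
  have hlen : (PySem.Dict.counter l : PySem.Dict String Int).values.length
      = (PySem.Dict.counter l : PySem.Dict String Int).keys.length := by
    show ((PySem.Dict.counter l : PySem.Dict String Int).items.map Prod.snd).length
        = ((PySem.Dict.counter l : PySem.Dict String Int).items.map Prod.fst).length
    simp
  have hset : PySem.Set.len (PySem.Set.ofList l)
      = (((PySem.Dict.counter l : PySem.Dict String Int).keys.length : ℕ) : Int) := by
    rw [hk]; rfl
  unfold pvRangeFold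
  rw [hset, pv_range_zip _ _ hnd hlen _ (le_refl _)]
  rw [List.take_of_length_le (le_refl _), List.take_of_length_le (le_of_eq hlen)]
  apply PySem.Dict.ext
  show ((PySem.Dict.counter l : PySem.Dict String Int).items.map Prod.fst).zip
      ((PySem.Dict.counter l : PySem.Dict String Int).items.map Prod.snd)
      = (PySem.Dict.counter l : PySem.Dict String Int).items
  rw [List.zip_map']
  simp

-- A's phase 2 over the grouped dict produces exactly the counted items
theorem pv_phase2_items (temp : PySem.Dict String (List String)) (hnd : temp.keys.Nodup) :
    (pvPhase2 temp).items = temp.items.map pvCf := by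
  unfold pvPhase2
  rw [PySem.List.foldl_congr_mem _ _ (fun r kv => r.insert kv.1 (PySem.Dict.counter kv.2)) _ ?_]
  · rw [PySem.Dict.items_foldl_insert_fresh temp.items Prod.fst (fun kv => PySem.Dict.counter kv.2)
        PySem.Dict.empty (fun _ _ => PySem.Dict.contains_empty _) hnd]
    rfl
  · intro r kv hkv
    rw [pv_rangeFold_eq_counter (temp.getD kv.1 []), PySem.Dict.getD_of_mem_items temp hkv hnd []]
    by_cases h : r.contains kv.1 = true
    · rw [if_pos h]
    · rw [if_neg (by simp [h]), PySem.Dict.insert_insert_self]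

theorem pv_A_result (dict_ : List (String × List (List String))) :
    count_moves dict_ = ((pvGroup (pvPairs dict_)).items.map pvCf).map (fun kv => (kv.1, kv.2.items)) := by
  have e : count_moves dict_
      = (pvPhase2 (dict_.foldl (fun t kv =>
          kv.2.foldl (fun t val =>
            if val.length == 3 then pvStepA t (kv.1, (PySem.List.pyGet? val 1).getD "") else t) t)
          PySem.Dict.empty)).items.map (fun kv => (kv.1, kv.2.items)) := rfl
  rw [e, pv_nested_foldl pvStepA dict_, pv_groupA,
      pv_phase2_items (pvGroup (pvPairs dict_)) (pv_nodup_group (pvPairs dict_))]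

theorem pv_B_result (dict_ : List (String × List (List String))) :
    count_moves_alt dict_ = ((pvGroup (pvPairs dict_)).items.map pvCf).map (fun kv => (kv.1, kv.2.items)) := by
  have e : count_moves_alt dict_
      = (dict_.foldl (fun r kv =>
          kv.2.foldl (fun r val =>
            if val.length == 3 then pvStepB r (kv.1, (PySem.List.pyGet? val 1).getD "") else r) r)
          PySem.Dict.empty).items.map (fun kv => (kv.1, kv.2.items)) := rfl
  rw [e, pv_nested_foldl pvStepB dict_, pv_b_fold_empty]

-- ===== VERDICT (by name: the statement is the Claim_ definition above) =====
theorem count_moves_spec : Claim_equal_count_moves := by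
  intro dict_ _
  show count_moves dict_ = count_moves_alt dict_
  rw [pv_A_result, pv_B_result]
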